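-- pv_equiv track=rewrite | github.com/AustinRyf/CptS355-AllProjects | HW3.py | indexHelper
-- ===== SOURCE A (Python) =====
-- def indexHelper(i, tL, k):
--     if k in tL[i][1]:
--         return tL[i][1][k] #if the key we want is in our current tuple dictionary return its value
--     elif i != 0:
--         i = tL[i][0]
--         return indexHelper(i, tL, k) #if we are not on the first tuple of the list, recursively call the function
--     elif i == 0:
--         if k in tL[i][1]:
--             return tL[i][1][k] #if we are on the the first tuple of the list, either return the value (if the key is present), or return None
--         else:
--             return None
--     else:
--         return None #if all else fails return None
-- ===== SOURCE B (Python) =====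
-- def indexHelper(i, tL, k):
--     # Bounded iteration instead of recursion: a well-formed parent chain visits
--     # each scope at most once, so len(tL)+1 steps always suffice.
--     for _ in range(len(tL) + 1):
--         d = tL[i][1]
--         if k in d:
--             return d[k]
--         if i == 0:
--             return None
--         i = tL[i][0]
--     return None
-- ===== Notes on version B (the rewrite author's own statement) =====
-- stated objective: simpler
-- what changed: A's recursive chain-walk with a redundant i==0 re-check is replaced by a bounded for-loop (at most len(tL)+1 iterations) that checks the current scope, stops at the root, and otherwise follows the parent pointer.
-- outside the precondition, e.g. on indexHelper(2, [(0, {'x': 5}), (0, {}), (-2, {})], 'x'): A returns 5, B returns 5; on indexHelper(1, [(0, {}), (2, {}), (0, {'x': 9})], 'x'): A returns 9, B returns 9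
import Mathlib
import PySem

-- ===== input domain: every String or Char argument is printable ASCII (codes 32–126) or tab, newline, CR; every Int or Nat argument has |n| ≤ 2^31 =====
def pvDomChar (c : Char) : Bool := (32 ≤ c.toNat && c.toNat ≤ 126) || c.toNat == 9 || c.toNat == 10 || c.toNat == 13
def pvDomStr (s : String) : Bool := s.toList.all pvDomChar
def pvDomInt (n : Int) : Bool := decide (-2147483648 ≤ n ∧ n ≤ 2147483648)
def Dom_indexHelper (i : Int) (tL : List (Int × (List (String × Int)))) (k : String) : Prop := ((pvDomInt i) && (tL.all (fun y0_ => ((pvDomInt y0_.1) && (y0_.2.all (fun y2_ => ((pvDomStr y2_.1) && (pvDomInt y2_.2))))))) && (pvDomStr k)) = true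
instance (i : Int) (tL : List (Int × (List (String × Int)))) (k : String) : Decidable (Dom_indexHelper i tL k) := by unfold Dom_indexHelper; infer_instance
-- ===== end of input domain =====

-- B replaces A's recursive chain-walk (with its redundant root re-check) by a bounded
-- for-loop over range(len(tL)+1) that checks the scope, stops at the root, or follows
-- the parent pointer (simpler, iterative decomposition).


-- first-match association-list lookup (Python dicts have unique keys, so this is d.get(k) / d[k])
def dictGet? (d : List (String × Int)) (k : String) : Option Int :=
  (d.find? (fun p => p.1 == k)).map (·.2)

-- ===== PORT A =====
-- A's recursion, made total with fuel; on Pre_ inputs the chain strictly descends, so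
-- fuel tL.length + 1 never runs out and the `none` fuel case is never reached.
def indexHelperGo : Nat → Int → List (Int × (List (String × Int))) → String → Option Int
  | 0, _, _, _ => none
  | fuel+1, i, tL, k =>
    match PySem.List.pyGet? tL i with
    | none => none          -- tL[i] raises IndexError: excluded by Pre_
    | some t =>
      match dictGet? t.2 k with
      | some v => some v                                   -- if k in tL[i][1]: return tL[i][1][k]
      | none =>
        if i ≠ 0 then indexHelperGo fuel t.1 tL k          -- elif i != 0: recurse on tL[i][0]
        else                                               -- elif i == 0: (A's redundant re-check)
          match dictGet? t.2 k with
          | some v => some v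
          | none => none                                   -- (A's final `else: return None` is unreachable)

def indexHelper (i : Int) (tL : List (Int × (List (String × Int)))) (k : String) : Option Int :=
  indexHelperGo (tL.length + 1) i tL k

-- ===== PORT B =====
-- B's for-loop body as one state transformer; the state is (early-return result, current i).
-- `(pyGet? …).getD (0, [])` stands in for the IndexError case, which Pre_ excludes.
def bStep (tL : List (Int × (List (String × Int)))) (k : String) :
    ((Option (Option Int)) × Int) → Nat → ((Option (Option Int)) × Int)
  | (some r, j), _ => (some r, j)                          -- already returned: loop body skipped
  | (none, j), _ =>
    let t := (PySem.List.pyGet? tL j).getD (0, [])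
    match dictGet? t.2 k with
    | some v => (some (some v), j)                         -- if k in d: return d[k]
    | none => if j == 0 then (some none, j)                -- if i == 0: return None
              else (none, t.1)                             -- i = tL[i][0]

def indexHelper_alt (i : Int) (tL : List (Int × (List (String × Int)))) (k : String) : Option Int :=
  (((List.range (tL.length + 1)).foldl (bStep tL k) (none, i)).1).getD none  -- final `return None`

-- ===== PRECONDITION & SPEC =====
-- k is in scope i's own dict (no parent hop needed)
def keyAt (tL : List (Int × (List (String × Int)))) (i : Int) (k : String) : Bool :=
  ((PySem.List.pyGet? tL i).map (fun t => t.2.any (fun p => p.1 == k))).getD false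

-- Pre_ admits every in-range index (negative Python indices included) whose own scope holds the
-- key or is the root, and otherwise requires a well-formed parent table (each non-root parent
-- pointer nonnegative and strictly below its entry); it excludes ill-formed tables whose lookup
-- needs a parent hop, where A may raise IndexError or RecursionError (cyclic chains) or happens
-- to terminate only through accidental negative-index wraparound or an upward hop.
def Pre_indexHelper (i : Int) (tL : List (Int × (List (String × Int)))) (k : String) : Prop :=
  PySem.Raise.InRange tL.length i ∧
  (keyAt tL i k = true ∨ i = 0 ∨
   (0 ≤ i ∧ ∀ j : Fin tL.length, 0 < j.val → 0 ≤ (tL.get j).1 ∧ (tL.get j).1 < (j.val : Int)))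
instance (i : Int) (tL : List (Int × (List (String × Int)))) (k : String) : Decidable (Pre_indexHelper i tL k) := by unfold Pre_indexHelper; infer_instance

def pvWitness_indexHelper : Int × (List (Int × (List (String × Int)))) × String :=
  (1, [(0, [("x", 1)]), (0, [("y", 2)])], "x")

def Spec_indexHelper (i : Int) (tL : List (Int × (List (String × Int)))) (k : String) (out : Option Int) : Prop := out = indexHelper_alt i tL k
instance (i : Int) (tL : List (Int × (List (String × Int)))) (k : String) (out : Option Int) : Decidable (Spec_indexHelper i tL k out) := by unfold Spec_indexHelper; infer_instance

-- ===== CLAIM (what is proved, stated in full; the proofs are below) =====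
def Claim_equal_indexHelper : Prop := ∀ (i : Int) (tL : List (Int × (List (String × Int)))) (k : String), Dom_indexHelper i tL k → Pre_indexHelper i tL k → Spec_indexHelper i tL k (indexHelper i tL k)

-- ===== LEMMAS AND PROOFS =====

-- once the loop state says "returned", further iterations do nothing
lemma foldl_bStep_done (tL : List (Int × (List (String × Int)))) (k : String)
    (l : List Nat) (r : Option Int) (j : Int) :
    l.foldl (bStep tL k) (some r, j) = (some r, j) := by
  induction l with
  | nil => rfl
  | cons a l ih => simpa [List.foldl, bStep] using ih

-- iterate bStep n times
def bIter (tL : List (Int × (List (String × Int)))) (k : String) :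
    Nat → ((Option (Option Int)) × Int) → ((Option (Option Int)) × Int)
  | 0, s => s
  | n+1, s => bIter tL k n (bStep tL k s 0)

lemma foldl_eq_bIter (tL : List (Int × (List (String × Int)))) (k : String) :
    ∀ (l : List Nat) (s : (Option (Option Int)) × Int),
      l.foldl (bStep tL k) s = bIter tL k l.length s := by
  intro l
  induction l with
  | nil => intro s; rfl
  | cons a l ih =>
    intro s
    have ha : bStep tL k s a = bStep tL k s 0 := by
      rcases s with ⟨r | r, j⟩ <;> rfl
    simp [List.foldl, bIter, ha, ih]

lemma bIter_done (tL : List (Int × (List (String × Int)))) (k : String)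
    (n : Nat) (r : Option Int) (j : Int) :
    bIter tL k n (some r, j) = (some r, j) := by
  induction n with
  | zero => rfl
  | succ n ih => simpa [bIter, bStep] using ih

-- on a well-formed parent table, the iterated loop computes exactly A's recursion
lemma go_eq_bIter (tL : List (Int × (List (String × Int)))) (k : String)
    (hwf : ∀ j : Fin tL.length, 0 < j.val → 0 ≤ (tL.get j).1 ∧ (tL.get j).1 < (j.val : Int)) :
    ∀ n (i : Int), 0 ≤ i → i < tL.length → i.toNat < n →
      (bIter tL k n (none, i)).1 = some (indexHelperGo n i tL k) := by
  intro n
  induction n with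
  | zero => intro i _ _ h; omega
  | succ f ih =>
    intro i hi0 hilen hfuel
    have hlt : i.toNat < tL.length := by omega
    have hget : PySem.List.pyGet? tL i = some (tL.get ⟨i.toNat, hlt⟩) := by
      rw [PySem.List.pyGet?_eq_some_getElem tL hi0 hilen]
      rfl
    simp only [bIter, bStep, indexHelperGo, hget, Option.getD_some]
    cases hd : dictGet? (tL.get ⟨i.toNat, hlt⟩).2 k with
    | some v => simp [bIter_done]
    | none =>
      by_cases hiz : i = 0
      · subst hiz
        simp [bIter_done]
      · have hipos : 0 < i.toNat := by omega
        have hwf' := hwf ⟨i.toNat, hlt⟩ hipos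
        have hp2 : (tL.get ⟨i.toNat, hlt⟩).1 < (i.toNat : Int) := by exact_mod_cast hwf'.2
        have hbe : (i == 0) = false := by simp [hiz]
        simp only [hbe, Bool.false_eq_true, if_false, if_pos (show i ≠ 0 from hiz)]
        exact ih (tL.get ⟨i.toNat, hlt⟩).1 hwf'.1 (by omega) (by omega)

-- ===== VERDICT (by name: the statement is the Claim_ definition above) =====
theorem indexHelper_spec : Claim_equal_indexHelper := by
  intro i tL k _ hpre
  obtain ⟨hin, hcase⟩ := hpre
  show indexHelper i tL k = indexHelper_alt i tL k
  have hsome : (PySem.List.pyGet? tL i).isSome := by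
    rcases h : PySem.List.pyGet? tL i with _ | t
    · exact absurd ((PySem.List.pyGet?_eq_none_iff tL i).1 h) (not_not_intro hin)
    · rfl
  obtain ⟨t, ht⟩ := Option.isSome_iff_exists.1 hsome
  have hrange : List.range (tL.length + 1) = 0 :: (List.range tL.length).map Nat.succ := by
    simp [List.range_succ_eq_map]
  rcases hcase with hkey | hz | ⟨hi0, hwf⟩
  · -- key in scope i's own dict: both sides return it in one step
    rw [keyAt, ht] at hkey
    simp only [Option.map_some, Option.getD_some] at hkey
    obtain ⟨p, hp, hpk⟩ := List.any_eq_true.1 hkey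
    rcases hq : t.2.find? (fun p => p.1 == k) with _ | q
    · exact absurd (List.find?_eq_none.1 hq p hp) (by simp [hpk])
    · have hv : dictGet? t.2 k = some q.2 := by simp [dictGet?, hq]
      unfold indexHelper indexHelper_alt indexHelperGo
      rw [hrange]
      simp [List.foldl, bStep, ht, hv, foldl_bStep_done]
  · -- at the root: both sides answer from tL[0] alone
    subst hz
    unfold indexHelper indexHelper_alt indexHelperGo
    rw [hrange]
    cases hd : dictGet? t.2 k with
    | some v => simp [List.foldl, bStep, hd, ht, foldl_bStep_done]
    | none => simp [List.foldl, bStep, hd, ht, foldl_bStep_done]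
  · -- well-formed parent table: the chain strictly descends
    have hilen : i < tL.length := hin.2
    unfold indexHelper indexHelper_alt
    rw [foldl_eq_bIter, List.length_range,
        go_eq_bIter tL k hwf (tL.length + 1) i hi0 hilen (by omega)]
    rfl
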